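-- pv_equiv track=rewrite | github.com/Sklych/jpack | backend/main.py | get_referral_targets
-- ===== SOURCE A (Python) =====
-- FIRST_REFERRAL_TARGET = 3
--
-- SECOND_REFERRAL_TARGET = 10
--
-- REFERRAL_TARGET_STEP = 10
--
-- def get_referral_targets(referral_count: int) -> list[int]:
--     targets = [FIRST_REFERRAL_TARGET]
--     next_target = SECOND_REFERRAL_TARGET
--
--     while True:
--         targets.append(next_target)
--         if referral_count < next_target:
--             break
--         next_target += REFERRAL_TARGET_STEP
--
--     return targets
-- ===== SOURCE B (Python) =====
-- FIRST_REFERRAL_TARGET = 3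
--
-- SECOND_REFERRAL_TARGET = 10
--
-- REFERRAL_TARGET_STEP = 10
--
--
-- def get_referral_targets(referral_count: int) -> list[int]:
--     # Closed form: the last target is the smallest multiple of 10 strictly
--     # greater than max(referral_count, 0), so no search loop is needed.
--     stop = max(referral_count, 0) + REFERRAL_TARGET_STEP + 1
--     return [FIRST_REFERRAL_TARGET] + list(
--         range(SECOND_REFERRAL_TARGET, stop, REFERRAL_TARGET_STEP)
--     )
-- ===== Notes on version B (the rewrite author's own statement) =====
-- stated objective: simpler
-- what changed: The append-and-test while-loop that searches for the first threshold exceeding the count is replaced by a closed-form bound: the result is [3] plus a single range() call whose stop is computed arithmetically from the clamped count, so no termination-by-testing loop remains.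
import Mathlib
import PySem

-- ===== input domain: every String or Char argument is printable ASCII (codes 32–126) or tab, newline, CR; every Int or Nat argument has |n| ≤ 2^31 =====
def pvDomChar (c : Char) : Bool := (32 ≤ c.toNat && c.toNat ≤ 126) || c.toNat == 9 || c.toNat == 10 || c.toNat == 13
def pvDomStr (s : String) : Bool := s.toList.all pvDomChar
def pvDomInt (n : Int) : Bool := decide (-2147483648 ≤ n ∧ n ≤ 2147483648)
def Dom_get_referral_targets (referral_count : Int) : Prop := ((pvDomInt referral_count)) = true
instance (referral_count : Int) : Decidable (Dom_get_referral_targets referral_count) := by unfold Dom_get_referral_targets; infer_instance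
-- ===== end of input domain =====

-- B replaces A's append-and-test while-loop by a closed-form range bound (objective: simpler).

-- ===== PORT A =====
-- the 'while True' loop: append next_target, break if referral_count < next_target, else step by 10
def grtLoop (referral_count next_target : Int) (targets : List Int) : List Int :=
  let targets := targets ++ [next_target]
  if referral_count < next_target then targets
  else grtLoop referral_count (next_target + 10) targets
termination_by (referral_count + 1 - next_target).toNat
decreasing_by omega

def get_referral_targets (referral_count : Int) : List Int :=
  grtLoop referral_count 10 [3]

-- ===== PORT B =====
def get_referral_targets_alt (referral_count : Int) : List Int :=
  [3] ++ PySem.List.pyRange 10 (max referral_count 0 + 10 + 1) 10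

-- ===== PRECONDITION & SPEC =====
def Spec_get_referral_targets (referral_count : Int) (out : List Int) : Prop := out = get_referral_targets_alt referral_count
instance (referral_count : Int) (out : List Int) : Decidable (Spec_get_referral_targets referral_count out) := by unfold Spec_get_referral_targets; infer_instance

-- ===== CLAIM (what is proved, stated in full; the proofs are below) =====
def Claim_equal_get_referral_targets : Prop := ∀ (referral_count : Int), Dom_get_referral_targets referral_count → Spec_get_referral_targets referral_count (get_referral_targets referral_count)

-- ===== LEMMAS AND PROOFS =====

-- unroll pyRange for the positive step 10
theorem pyRange_ten_cons (a b : Int) (h : a < b) :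
    PySem.List.pyRange a b 10 = a :: PySem.List.pyRange (a + 10) b 10 := by
  rw [PySem.List.pyRange_of_pos a b (by norm_num),
      PySem.List.pyRange_of_pos (a + 10) b (by norm_num)]
  have h1 : ((b - a + 10 - 1) / 10).toNat = ((b - (a + 10) + 10 - 1) / 10).toNat + 1 := by
    omega
  simp only [if_pos h, h1]
  by_cases h2 : a + 10 < b
  · simp only [if_pos h2, List.range_succ_eq_map, List.map_cons, List.map_map]
    congr 1
    · ring
    · apply List.map_congr_left
      intro k _
      simp [Function.comp]
      ring
  · have h3 : ((b - (a + 10) + 10 - 1) / 10).toNat = 0 := by omega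
    simp only [if_neg h2, h3]
    simp [List.range_succ_eq_map]

theorem pyRange_ten_nil (a b : Int) (h : b ≤ a) :
    PySem.List.pyRange a b 10 = [] := by
  rw [PySem.List.pyRange_of_pos a b (by norm_num)]
  simp [if_neg (by omega : ¬ a < b)]

-- loop invariant: from state next_target, the loop emits exactly
-- pyRange next_target (max referral_count (next_target - 10) + 11) 10
theorem grtLoop_eq (referral_count next_target : Int) (acc : List Int) :
    grtLoop referral_count next_target acc =
      acc ++ PySem.List.pyRange next_target (max referral_count (next_target - 10) + 10 + 1) 10 := by
  rw [grtLoop]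
  by_cases h : referral_count < next_target
  · simp only [if_pos h]
    have hb : next_target < max referral_count (next_target - 10) + 10 + 1 := by omega
    rw [pyRange_ten_cons _ _ hb,
        pyRange_ten_nil _ _ (by omega)]
  · simp only [if_neg h]
    rw [grtLoop_eq referral_count (next_target + 10)]
    have hm : max referral_count (next_target + 10 - 10) = max referral_count (next_target - 10) := by
      omega
    rw [hm, pyRange_ten_cons next_target _ (by omega)]
    simp
termination_by (referral_count + 1 - next_target).toNat
decreasing_by omega

-- ===== VERDICT (by name: the statement is the Claim_ definition above) =====
theorem get_referral_targets_spec : Claim_equal_get_referral_targets := by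
  intro n _
  unfold Spec_get_referral_targets get_referral_targets get_referral_targets_alt
  rw [grtLoop_eq]
  have : max n (10 - 10 : Int) = max n 0 := by norm_num
  rw [this]
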